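-- pv_equiv track=rewrite | github.com/pc5401/my_BOJ | 백준/Silver/5840. Breed Proximity/Breed Proximity.py | solve
-- ===== SOURCE A (Python) =====
-- def solve(N: int, K: int, breeds: list[int]) -> int:
--     last_pos = {}
--     ans = -1
--     for i, b in enumerate(breeds):
--         if b in last_pos and i - last_pos[b] <= K:
--             if b > ans:
--                 ans = b
--         last_pos[b] = i
--     return ans
-- ===== SOURCE B (Python) =====
-- def solve(N: int, K: int, breeds: list[int]) -> int:
--     # Windowed nested scan: no last-position dict; check each index's window directly.
--     ans = -1
--     for i, b in enumerate(breeds):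
--         lo = i - K if i - K > 0 else 0
--         for j in range(lo, i):
--             if breeds[j] == b and b > ans:
--                 ans = b
--     return ans
-- ===== Notes on version B (the rewrite author's own statement) =====
-- stated objective: alternative
-- what changed: Replaced the last-position dictionary (single pass, hash state) with a dict-free nested scan that, for each index i, searches the window [max(0,i-K), i) directly for an equal breed and keeps a running max.
import Mathlib
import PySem

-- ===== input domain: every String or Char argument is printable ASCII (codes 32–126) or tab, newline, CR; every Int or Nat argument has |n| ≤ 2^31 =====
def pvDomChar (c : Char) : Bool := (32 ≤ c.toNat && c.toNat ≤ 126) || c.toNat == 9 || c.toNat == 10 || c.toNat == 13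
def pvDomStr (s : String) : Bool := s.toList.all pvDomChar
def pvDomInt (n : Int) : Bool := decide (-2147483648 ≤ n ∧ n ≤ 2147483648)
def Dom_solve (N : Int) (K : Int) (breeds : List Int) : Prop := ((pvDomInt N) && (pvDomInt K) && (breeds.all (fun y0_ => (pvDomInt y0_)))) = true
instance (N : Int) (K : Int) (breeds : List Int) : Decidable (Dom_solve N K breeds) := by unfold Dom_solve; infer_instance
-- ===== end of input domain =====

-- B replaces A's last-position dictionary with a dict-free nested scan of the window [max(0,i-K), i) (alternative decomposition, same results).

-- ===== PORT A =====
-- the for-loop over enumerate(breeds) carrying (last_pos, ans)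
def solveLoopA (K : Int) : List (Int × Int) → PySem.Dict Int Int → Int → Int
  | [], _, ans => ans
  | (i, b) :: rest, d, ans =>
    let ans' :=
      match d.get? b with            -- `b in last_pos` + `last_pos[b]`
      | some p => if i - p ≤ K then (if b > ans then b else ans) else ans
      | none => ans
    solveLoopA K rest (d.insert b i) ans'

def solve (N : Int) (K : Int) (breeds : List Int) : Int :=
  solveLoopA K (PySem.List.enumerate breeds 0) PySem.Dict.empty (-1)

-- ===== PORT B =====
-- inner loop: for j in range(lo, i): if breeds[j] == b and b > ans: ans = b
-- (breeds[j] is always in range here since 0 ≤ lo ≤ j < i ≤ len(breeds); pyGetD's default is never used)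
def solveAltInner (breeds : List Int) (K : Int) (ans : Int) (p : Int × Int) : Int :=
  let lo := if p.1 - K > 0 then p.1 - K else 0
  (PySem.List.pyRange lo p.1 1).foldl
    (fun a j => if PySem.List.pyGetD breeds j 0 = p.2 ∧ p.2 > a then p.2 else a) ans

def solve_alt (N : Int) (K : Int) (breeds : List Int) : Int :=
  (PySem.List.enumerate breeds 0).foldl (solveAltInner breeds K) (-1)

-- ===== PRECONDITION & SPEC =====
def Spec_solve (N : Int) (K : Int) (breeds : List Int) (out : Int) : Prop := out = solve_alt N K breeds
instance (N : Int) (K : Int) (breeds : List Int) (out : Int) : Decidable (Spec_solve N K breeds out) := by unfold Spec_solve; infer_instance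

-- ===== CLAIM (what is proved, stated in full; the proofs are below) =====
def Claim_equal_solve : Prop := ∀ (N : Int) (K : Int) (breeds : List Int), Dom_solve N K breeds → Spec_solve N K breeds (solve N K breeds)

-- ===== LEMMAS AND PROOFS =====

-- index (from i0) of the LAST occurrence of c in xs; characterizes A's last_pos dict
def lastOcc : List Int → Int → Int → Option Int
  | [], _, _ => none
  | x :: xs, i0, c =>
    match lastOcc xs (i0 + 1) c with
    | some p => some p
    | none => if x = c then some i0 else none

theorem lastOcc_some (xs : List Int) : ∀ (i0 c p : Int), lastOcc xs i0 c = some p →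
    ∃ k : Nat, k < xs.length ∧ p = i0 + k ∧ xs[k]? = some c := by
  induction xs with
  | nil => intro i0 c p h; simp [lastOcc] at h
  | cons x xs ih =>
    intro i0 c p h
    simp only [lastOcc] at h
    cases hrec : lastOcc xs (i0 + 1) c with
    | some q =>
      rw [hrec] at h
      obtain ⟨k, hk, hq, hget⟩ := ih (i0 + 1) c q hrec
      refine ⟨k + 1, by simpa using Nat.succ_lt_succ hk, ?_, by simpa using hget⟩
      cases h; push_cast; omega
    | none =>
      rw [hrec] at h
      by_cases hxc : x = c
      · simp [hxc] at h
        exact ⟨0, by simp, by omega, by simp [hxc]⟩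
      · simp [hxc] at h

theorem lastOcc_ge (xs : List Int) : ∀ (i0 c : Int) (k : Nat), xs[k]? = some c →
    ∃ p, lastOcc xs i0 c = some p ∧ i0 + k ≤ p := by
  induction xs with
  | nil => intro i0 c k h; simp at h
  | cons x xs ih =>
    intro i0 c k h
    cases k with
    | zero =>
      simp at h
      cases hrec : lastOcc xs (i0 + 1) c with
      | some q =>
        obtain ⟨k', _, hq, _⟩ := lastOcc_some xs (i0 + 1) c q hrec
        exact ⟨q, by simp [lastOcc, hrec], by omega⟩
      | none => exact ⟨i0, by simp [lastOcc, hrec, h], by omega⟩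
    | succ k' =>
      simp only [List.getElem?_cons_succ] at h
      obtain ⟨p, hp, hle⟩ := ih (i0 + 1) c k' h
      refine ⟨p, by simp [lastOcc, hp], by push_cast at hle ⊢; omega⟩

theorem lastOcc_append_singleton (pre : List Int) : ∀ (i0 b c : Int),
    lastOcc (pre ++ [b]) i0 c = if c = b then some (i0 + pre.length) else lastOcc pre i0 c := by
  induction pre with
  | nil =>
    intro i0 b c
    by_cases h : c = b
    · subst h; simp [lastOcc]
    · simp [lastOcc, h, Ne.symm h]
  | cons x pre ih =>
    intro i0 b c
    simp only [List.cons_append, lastOcc, ih (i0 + 1) b c]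
    by_cases h : c = b
    · simp [h]; ring_nf
    · simp [h]

-- the inner fold keeps ans unless the window contains a match and b beats ans
theorem foldl_window (b : Int) (P : Int → Prop) [DecidablePred P] :
    ∀ (js : List Int) (ans : Int),
    js.foldl (fun a j => if P j ∧ b > a then b else a) ans
      = if (∃ j ∈ js, P j) ∧ b > ans then b else ans := by
  intro js
  induction js with
  | nil => intro ans; simp
  | cons j js ih =>
    intro ans
    simp only [List.foldl_cons]
    by_cases h1 : P j
    · by_cases h2 : b > ans
      · rw [if_pos ⟨h1, h2⟩, ih]
        simp [h1, h2]
      · rw [if_neg (by tauto), ih]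
        simp [h2]
    · rw [if_neg (by tauto), ih]
      have hiff : (∃ x ∈ j :: js, P x) ↔ (∃ x ∈ js, P x) := by
        simp only [List.mem_cons]
        constructor
        · rintro ⟨x, hx | hx, hPx⟩
          · exact absurd (hx ▸ hPx) h1
          · exact ⟨x, hx, hPx⟩
        · rintro ⟨x, hx, hPx⟩; exact ⟨x, Or.inr hx, hPx⟩
      simp only [hiff]

theorem foldl_window' (breeds : List Int) (b : Int) (js : List Int) (ans : Int) :
    js.foldl (fun a j => if PySem.List.pyGetD breeds j 0 = b ∧ b > a then b else a) ans
      = if (∃ j ∈ js, PySem.List.pyGetD breeds j 0 = b) ∧ b > ans then b else ans :=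
  foldl_window b (fun j => PySem.List.pyGetD breeds j 0 = b) js ans

-- the dict condition at step i = |pre| equals "some window index holds b"
theorem cond_iff (pre suf : List Int) (b K : Int) :
    ((∃ p, lastOcc pre 0 b = some p ∧ (pre.length : Int) - p ≤ K) ↔
     (∃ j ∈ PySem.List.pyRange
        (if (pre.length : Int) - K > 0 then (pre.length : Int) - K else 0)
        (pre.length : Int) 1,
        PySem.List.pyGetD (pre ++ b :: suf) j 0 = b)) := by
  constructor
  · rintro ⟨p, hp, hK⟩
    obtain ⟨k, hk, hpk, hget⟩ := lastOcc_some pre 0 b p hp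
    subst hpk
    refine ⟨(k : Int), ?_, ?_⟩
    · rw [PySem.List.mem_pyRange_one]
      refine ⟨by split <;> omega, by exact_mod_cast hk⟩
    · rw [PySem.List.pyGetD_natCast]
      have h1 : (pre ++ b :: suf)[k]? = some b := by
        rw [List.getElem?_append_left hk]; exact hget
      simp [List.getD_eq_getElem?_getD, h1]
  · rintro ⟨j, hj, hget⟩
    rw [PySem.List.mem_pyRange_one] at hj
    have hj0 : 0 ≤ j := by rcases hj with ⟨h1, h2⟩; split at h1 <;> omega
    obtain ⟨k, rfl⟩ := Int.eq_ofNat_of_zero_le hj0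
    have hk : k < pre.length := by exact_mod_cast hj.2
    rw [PySem.List.pyGetD_natCast] at hget
    have hsome : pre[k]? = some pre[k] := List.getElem?_eq_getElem hk
    have hgk : pre[k]? = some b := by
      have hg2 : (pre ++ b :: suf)[k]? = pre[k]? := List.getElem?_append_left hk
      have hh : (pre ++ b :: suf).getD k 0 = b := hget
      rw [List.getD_eq_getElem?_getD, hg2, hsome] at hh
      simp only [Option.getD_some] at hh
      rw [hsome, hh]
    obtain ⟨p, hp, hle⟩ := lastOcc_ge pre 0 b k hgk
    exact ⟨p, hp, by rcases hj with ⟨h1, _⟩; split at h1 <;> omega⟩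

-- main loop correspondence, by induction on the remaining suffix
theorem loop_eq (K : Int) : ∀ (suf pre : List Int) (d : PySem.Dict Int Int) (ans : Int),
    (∀ c, d.get? c = lastOcc pre 0 c) →
    solveLoopA K (PySem.List.enumerate suf (pre.length : Int)) d ans
      = (PySem.List.enumerate suf (pre.length : Int)).foldl (solveAltInner (pre ++ suf) K) ans := by
  intro suf
  induction suf with
  | nil => intro pre d ans _; simp [PySem.List.enumerate_nil, solveLoopA]
  | cons b suf ih =>
    intro pre d ans hinv
    rw [PySem.List.enumerate_cons]
    simp only [solveLoopA, List.foldl_cons]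
    have hcond := cond_iff pre suf b K
    -- the two new accumulators agree
    have hans : (match d.get? b with
        | some p => if (pre.length : Int) - p ≤ K then (if b > ans then b else ans) else ans
        | none => ans)
        = solveAltInner (pre ++ b :: suf) K ans ((pre.length : Int), b) := by
      unfold solveAltInner
      rw [foldl_window' (pre ++ b :: suf) b]
      rw [hinv b]
      cases hl : lastOcc pre 0 b with
      | none =>
        have hnB : ¬ (∃ j ∈ PySem.List.pyRange
            (if (pre.length : Int) - K > 0 then (pre.length : Int) - K else 0)
            (pre.length : Int) 1, PySem.List.pyGetD (pre ++ b :: suf) j 0 = b) := by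
          intro hB
          obtain ⟨p, hp, _⟩ := hcond.mpr hB
          rw [hl] at hp; simp at hp
        simp
        intro x h1 h2 h3 _
        exact (hnB ⟨x, PySem.List.mem_pyRange_one.mpr ⟨by split <;> split at h1 <;> omega, h2⟩, h3⟩).elim
      | some p =>
        by_cases hK : (pre.length : Int) - p ≤ K
        · have hB : (∃ j ∈ PySem.List.pyRange
              (if (pre.length : Int) - K > 0 then (pre.length : Int) - K else 0)
              (pre.length : Int) 1, PySem.List.pyGetD (pre ++ b :: suf) j 0 = b) :=
            hcond.mp ⟨p, hl, hK⟩
          by_cases hba : b > ans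
          · simp [hK, hba]
            intro h
            obtain ⟨j, hj, hje⟩ := hB
            rw [PySem.List.mem_pyRange_one] at hj
            exact (h j (by rcases hj with ⟨h1, h2⟩; split <;> split at h1 <;> omega) hj.2 hje).elim
          · simp [hK, hba]
        · have hnB : ¬ (∃ j ∈ PySem.List.pyRange
              (if (pre.length : Int) - K > 0 then (pre.length : Int) - K else 0)
              (pre.length : Int) 1, PySem.List.pyGetD (pre ++ b :: suf) j 0 = b) := by
            intro hB
            obtain ⟨q, hq, hKq⟩ := hcond.mpr hB
            rw [hl] at hq
            cases hq
            exact hK hKq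
          simp [hK]
          intro x h1 h2 h3 _
          exact (hnB ⟨x, PySem.List.mem_pyRange_one.mpr ⟨by split <;> split at h1 <;> omega, h2⟩, h3⟩).elim
    rw [hans]
    -- apply the IH with pre := pre ++ [b]
    have hlen : ((pre ++ [b]).length : Int) = (pre.length : Int) + 1 := by
      simp
    have hinv' : ∀ c, (d.insert b (pre.length : Int)).get? c = lastOcc (pre ++ [b]) 0 c := by
      intro c
      rw [PySem.Dict.get?_insert, lastOcc_append_singleton pre 0 b c, hinv c]
      simp
    have := ih (pre ++ [b]) (d.insert b (pre.length : Int))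
      (solveAltInner (pre ++ b :: suf) K ans ((pre.length : Int), b)) hinv'
    rw [hlen] at this
    rw [show (pre ++ [b]) ++ suf = pre ++ b :: suf by simp] at this
    exact this

-- ===== VERDICT (by name: the statement is the Claim_ definition above) =====
theorem solve_spec : Claim_equal_solve := by
  intro N K breeds _
  unfold Spec_solve solve solve_alt
  have := loop_eq K breeds [] PySem.Dict.empty (-1) (by intro c; simp [lastOcc, PySem.Dict.get?_empty])
  simpa using this
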